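-- pv_equiv track=rewrite | github.com/antoniosetya/BattleshipsBot | Bot/Python3/bot.py | ship_count
-- ===== SOURCE A (Python) =====
-- def ship_count(enemy_location):
--     count = 0
--     sisa = 0
--     for ship in enemy_location :
--         if not ship['Destroyed']:
--             count += 1
--         if not ship['Destroyed'] and ship['ShipType'] == 'Submarine':
--             sisa += 3
--         if not ship['Destroyed'] and ship['ShipType'] == 'Battleship':
--             sisa += 4
--         if not ship['Destroyed'] and ship['ShipType'] == 'Carrier':
--             sisa += 5
--         if not ship['Destroyed'] and ship['ShipType'] == 'Cruiser':
--             sisa += 3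
--         if not ship['Destroyed'] and ship['ShipType'] == 'Destroyer':
--             sisa += 2
--     return count,sisa
-- ===== SOURCE B (Python) =====
-- def ship_count(enemy_location):
--     sizes = {'Submarine': 3, 'Battleship': 4, 'Carrier': 5, 'Cruiser': 3, 'Destroyer': 2}
--     live_types = [ship['ShipType'] for ship in enemy_location if not ship['Destroyed']]
--     counter = {}
--     for t in live_types:
--         counter[t] = counter.get(t, 0) + 1
--     count = sum(counter.values())
--     sisa = sum(n * sizes.get(t, 0) for t, n in counter.items())
--     return count, sisa
-- ===== Notes on version B (the rewrite author's own statement) =====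
-- stated objective: alternative
-- what changed: Replaces A's five per-ship equality chains by a two-phase pipeline: one pass builds a counter of live ShipTypes, then a second pass over the (few, distinct) TYPES combines it with a size table via sizes.get(t, 0), so unknown types add to the ship count but 0 hull cells.
import Mathlib
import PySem

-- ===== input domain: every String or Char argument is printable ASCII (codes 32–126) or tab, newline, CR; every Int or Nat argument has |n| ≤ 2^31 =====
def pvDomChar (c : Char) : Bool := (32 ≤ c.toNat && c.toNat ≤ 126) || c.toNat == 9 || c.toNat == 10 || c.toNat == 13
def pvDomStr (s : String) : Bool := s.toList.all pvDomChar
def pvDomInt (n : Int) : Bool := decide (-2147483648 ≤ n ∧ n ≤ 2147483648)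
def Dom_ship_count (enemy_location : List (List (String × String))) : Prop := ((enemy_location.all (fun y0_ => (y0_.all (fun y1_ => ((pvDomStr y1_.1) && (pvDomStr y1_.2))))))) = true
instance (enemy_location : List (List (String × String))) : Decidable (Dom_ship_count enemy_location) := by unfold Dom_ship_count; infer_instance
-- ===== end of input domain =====

-- B replaces A's five per-ship equality chains by a counter of live ship types joined
-- against a size table over the distinct TYPES (alternative decomposition, same asymptotic cost).

-- ===== PORT A =====
-- dict lookup ship[k] (first match; "" stands in for the KeyError case, excluded by Pre_)
def lookA (ship : List (String × String)) (k : String) : String :=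
  ((ship.find? (fun p => p.1 == k)).map (fun p => p.2)).getD ""

def ship_count (enemy_location : List (List (String × String))) : Int × Int :=
  enemy_location.foldl (fun (acc : Int × Int) ship =>
    let count := acc.1
    let sisa := acc.2
    let count := if lookA ship "Destroyed" == "" then count + 1 else count
    let sisa := if lookA ship "Destroyed" == "" && lookA ship "ShipType" == "Submarine" then sisa + 3 else sisa
    let sisa := if lookA ship "Destroyed" == "" && lookA ship "ShipType" == "Battleship" then sisa + 4 else sisa
    let sisa := if lookA ship "Destroyed" == "" && lookA ship "ShipType" == "Carrier" then sisa + 5 else sisa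
    let sisa := if lookA ship "Destroyed" == "" && lookA ship "ShipType" == "Cruiser" then sisa + 3 else sisa
    let sisa := if lookA ship "Destroyed" == "" && lookA ship "ShipType" == "Destroyer" then sisa + 2 else sisa
    (count, sisa)) (0, 0)

-- ===== PORT B =====
-- dict lookup ship[k] (first match; "" stands in for the KeyError case, excluded by Pre_)
def lookB (ship : List (String × String)) (k : String) : String :=
  ((ship.find? (fun p => p.1 == k)).map (fun p => p.2)).getD ""

def sizesB : PySem.Dict String Int :=
  PySem.Dict.ofList [("Submarine", 3), ("Battleship", 4), ("Carrier", 5), ("Cruiser", 3), ("Destroyer", 2)]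

def ship_count_alt (enemy_location : List (List (String × String))) : Int × Int :=
  let liveTypes := (enemy_location.filter (fun ship => lookB ship "Destroyed" == "")).map
    (fun ship => lookB ship "ShipType")
  let counter := liveTypes.foldl (fun (d : PySem.Dict String Int) t => d.insert t (d.getD t 0 + 1)) PySem.Dict.empty
  let count := counter.values.foldl (fun (a n : Int) => a + n) 0
  let sisa := counter.items.foldl (fun (a : Int) (p : String × Int) => a + p.2 * sizesB.getD p.1 0) 0
  (count, sisa)

-- ===== PRECONDITION & SPEC =====
-- Pre_ excludes exactly the inputs where Python A raises KeyError: a ship without a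
-- 'Destroyed' key, or a live (falsy 'Destroyed') ship without a 'ShipType' key.
def Pre_ship_count (enemy_location : List (List (String × String))) : Prop :=
  (enemy_location.all (fun ship =>
    (ship.find? (fun p => p.1 == "Destroyed")).isSome &&
    (!(((ship.find? (fun p => p.1 == "Destroyed")).map (fun p => p.2)).getD "X" == "") ||
      (ship.find? (fun p => p.1 == "ShipType")).isSome))) = true
instance (enemy_location : List (List (String × String))) : Decidable (Pre_ship_count enemy_location) := by
  unfold Pre_ship_count; infer_instance

def pvWitness_ship_count : (List (List (String × String))) :=
  [[("Destroyed", ""), ("ShipType", "Submarine")], [("Destroyed", "X")],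
   [("Destroyed", ""), ("ShipType", "Frigate")]]

def Spec_ship_count (enemy_location : List (List (String × String))) (out : Int × Int) : Prop :=
  out = ship_count_alt enemy_location
instance (enemy_location : List (List (String × String))) (out : Int × Int) : Decidable (Spec_ship_count enemy_location out) := by
  unfold Spec_ship_count; infer_instance

-- ===== CLAIM (what is proved, stated in full; the proofs are below) =====
def Claim_equal_ship_count : Prop := ∀ (enemy_location : List (List (String × String))), Dom_ship_count enemy_location → Pre_ship_count enemy_location → Spec_ship_count enemy_location (ship_count enemy_location)

-- ===== LEMMAS AND PROOFS =====

-- the effective per-type hull size A's five branches encode (0 for unknown types)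
def szF (t : String) : Int :=
  if t = "Submarine" then 3 else if t = "Battleship" then 4 else if t = "Carrier" then 5
  else if t = "Cruiser" then 3 else if t = "Destroyer" then 2 else 0

theorem sizesB_getD (t : String) : sizesB.getD t 0 = szF t := by
  unfold sizesB szF
  simp [PySem.Dict.ofList]
  split_ifs <;> simp_all [PySem.Dict.update, PySem.Dict.getD_insert, PySem.Dict.getD_empty]

theorem sum_map_discard (g : String → Int) (s : List String) (x : String) :
    (s.map g).sum = ((PySem.Set.discard s x).map g).sum + (s.count x : Int) * g x := by
  induction s with
  | nil => simp [PySem.Set.discard]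
  | cons a s ih =>
    by_cases h : a = x
    · subst h
      simp [PySem.Set.discard] at *
      rw [ih]; ring
    · simp [PySem.Set.discard, h] at *
      rw [ih]; ring

theorem sum_count_mul (f : String → Int) (ts : List String) :
    ((PySem.Set.ofList ts).map (fun k => (ts.count k : Int) * f k)).sum = (ts.map f).sum := by
  induction ts with
  | nil => simp [PySem.Set.ofList]
  | cons x xs ih =>
    rw [PySem.Set.ofList_cons]
    simp only [List.map_cons, List.sum_cons]
    have hcongr : (PySem.Set.discard (PySem.Set.ofList xs) x).map
        (fun k => (((x :: xs).count k : Int)) * f k)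
        = (PySem.Set.discard (PySem.Set.ofList xs) x).map (fun k => ((xs.count k : Int)) * f k) := by
      apply List.map_congr_left
      intro k hk
      have hne : k ≠ x :=
        ((PySem.Set.mem_discard (s := PySem.Set.ofList xs) (x := x) (y := k)).1 hk).2
      simp [List.count_cons]
      exact Or.inl (fun h => hne h.symm)
    rw [hcongr]
    have hsplit := sum_map_discard (fun k => ((xs.count k : Int)) * f k) (PySem.Set.ofList xs) x
    have hcount : ((PySem.Set.ofList xs).count x : Int) = if x ∈ xs then 1 else 0 := by
      by_cases hx : x ∈ xs
      · rw [List.count_eq_one_of_mem (PySem.Set.nodup_ofList xs) (by rw [PySem.Set.mem_ofList]; exact hx)]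
        simp [hx]
      · rw [List.count_eq_zero_of_not_mem (by rw [PySem.Set.mem_ofList]; exact hx)]
        simp [hx]
    rw [ih] at hsplit
    rw [hcount] at hsplit
    by_cases hx : x ∈ xs
    · simp [hx] at hsplit
      have hc1 : ((x :: xs).count x : Int) = (xs.count x : Int) + 1 := by simp
      rw [hc1]
      linarith [hsplit]
    · have hc0 : (xs.count x : Int) = 0 := by
        rw [List.count_eq_zero_of_not_mem hx]; rfl
      simp [hx, hc0] at hsplit
      have hc1 : ((x :: xs).count x : Int) = (xs.count x : Int) + 1 := by simp
      rw [hc1, hc0]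
      linarith [hsplit]

-- generic foldl-into-sum lemmas for B's two reduction loops
theorem foldl_add_id (l : List Int) (a : Int) :
    l.foldl (fun (a n : Int) => a + n) a = a + l.sum := by
  induction l generalizing a with
  | nil => simp
  | cons x xs ih => simp [List.foldl_cons, ih, add_assoc]

theorem foldl_add_pair (l : List (String × Int)) (a : Int) :
    l.foldl (fun (a : Int) (p : String × Int) => a + p.2 * sizesB.getD p.1 0) a
      = a + (l.map (fun p => p.2 * sizesB.getD p.1 0)).sum := by
  induction l generalizing a with
  | nil => simp
  | cons x xs ih => simp [List.foldl_cons, ih, add_assoc]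

-- A's fold characterised: count of live ships, and per-live-ship szF of its type
theorem A_fold (el : List (List (String × String))) (c s : Int) :
    el.foldl (fun (acc : Int × Int) ship =>
      let count := acc.1
      let sisa := acc.2
      let count := if lookA ship "Destroyed" == "" then count + 1 else count
      let sisa := if lookA ship "Destroyed" == "" && lookA ship "ShipType" == "Submarine" then sisa + 3 else sisa
      let sisa := if lookA ship "Destroyed" == "" && lookA ship "ShipType" == "Battleship" then sisa + 4 else sisa
      let sisa := if lookA ship "Destroyed" == "" && lookA ship "ShipType" == "Carrier" then sisa + 5 else sisa
      let sisa := if lookA ship "Destroyed" == "" && lookA ship "ShipType" == "Cruiser" then sisa + 3 else sisa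
      let sisa := if lookA ship "Destroyed" == "" && lookA ship "ShipType" == "Destroyer" then sisa + 2 else sisa
      (count, sisa)) (c, s)
    = (c + ((el.filter (fun ship => lookA ship "Destroyed" == "")).length : Int),
       s + (((el.filter (fun ship => lookA ship "Destroyed" == "")).map
              (fun ship => szF (lookA ship "ShipType"))).sum)) := by
  induction el generalizing c s with
  | nil => simp
  | cons sh el ih =>
    simp only [List.foldl_cons]
    rw [ih]
    by_cases hl : lookA sh "Destroyed" == ""
    · rw [List.filter_cons_of_pos (by simpa using hl)]
      simp only [hl, Bool.true_and, if_true, List.length_cons, List.map_cons, List.sum_cons,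
        Prod.mk.injEq]
      refine ⟨by push_cast; ring, ?_⟩
      by_cases h1 : lookA sh "ShipType" = "Submarine"
      · simp [szF, h1]; ring
      · by_cases h2 : lookA sh "ShipType" = "Battleship"
        · simp [szF, h2]; (try ring)
        · by_cases h3 : lookA sh "ShipType" = "Carrier"
          · simp [szF, h3]; (try ring)
          · by_cases h4 : lookA sh "ShipType" = "Cruiser"
            · simp [szF, h4]; (try ring)
            · by_cases h5 : lookA sh "ShipType" = "Destroyer"
              · simp [szF, h5]; ring
              · simp [szF, h1, h2, h3, h4, h5]
    · rw [List.filter_cons_of_neg (by simpa using hl)]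
      simp [hl]

-- ===== VERDICT (by name: the statement is the Claim_ definition above) =====
theorem ship_count_spec : Claim_equal_ship_count := by
  intro el _ _
  unfold Spec_ship_count ship_count ship_count_alt
  rw [A_fold]
  have hlook : lookB = lookA := rfl
  rw [hlook]
  dsimp only
  rw [PySem.Dict.foldl_insert_getD_add_one_eq_counter]
  rw [foldl_add_id, foldl_add_pair]
  set ts := (el.filter (fun ship => lookA ship "Destroyed" == "")).map
    (fun ship => lookA ship "ShipType") with hts
  rw [PySem.Dict.items_counter]
  have hvals : (PySem.Dict.counter ts).values
      = (PySem.Set.ofList ts).map (fun k => ((ts.count k : Int))) := by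
    show (PySem.Dict.counter ts).items.map _ = _
    rw [PySem.Dict.items_counter]
    simp [Function.comp]
  rw [hvals]
  have hcnt : ((PySem.Set.ofList ts).map (fun k => ((ts.count k : Int)))).sum
      = ((ts.length : Int)) := by
    have h := sum_count_mul (fun _ => 1) ts
    simpa using h
  have hsz : (((PySem.Set.ofList ts).map (fun k => (k, (ts.count k : Int)))).map
        (fun p => p.2 * sizesB.getD p.1 0)).sum
      = (ts.map szF).sum := by
    rw [List.map_map]
    have h := sum_count_mul szF ts
    simpa [Function.comp, sizesB_getD] using h
  rw [hcnt, hsz, hts]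
  rw [List.map_map]
  simp [Function.comp_def]
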